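-- pv_equiv track=rewrite | github.com/jaakkopy/advent-of-code | 2023/day14/solution.py | tilt_horizontal
-- ===== SOURCE A (Python) =====
-- def tilt_horizontal(lines, direction):
--     rows = len(lines)
--     cols = len(lines[0])
--     (start, end, inc) = (0, cols, 1) if direction == -1 else (cols - 1, -1, -1)
--     s = 0
--     for c in range(start, end, inc):
--         for r in range(rows):
--             if lines[r][c] == 'O':
--                 pos = c + direction
--                 while (pos >= 0 and pos < cols) and lines[r][pos] == '.':
--                     lines[r][pos], lines[r][pos-direction] = lines[r][pos-direction], lines[r][pos]
--                     pos += direction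
--                 s += rows - r
--     return s
-- ===== SOURCE B (Python) =====
-- def tilt_horizontal(lines, direction):
--     # Horizontal tilting never changes a rock's row, so the row-weighted load
--     # is independent of the final columns: count rocks per row directly.
--     # (Return value only: unlike A, this does not mutate `lines`.)
--     rows = len(lines)
--     cols = len(lines[0])
--     return sum((rows - r) * row[:cols].count('O') for r, row in enumerate(lines))
-- ===== Notes on version B (the rewrite author's own statement) =====
-- stated objective: faster
-- what changed: B replaces A's column-by-column in-place rock-sliding simulation (nested loops plus a while-loop moving each rock cell by cell) with a closed form: horizontal tilting never changes a rock's row, so the answer is just the row-weighted count of 'O' cells, one pass and no mutation.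
-- outside the precondition, e.g. on tilt_horizontal([['.', '.', 'O']], -2): A returns 2, B returns 1
import Mathlib
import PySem

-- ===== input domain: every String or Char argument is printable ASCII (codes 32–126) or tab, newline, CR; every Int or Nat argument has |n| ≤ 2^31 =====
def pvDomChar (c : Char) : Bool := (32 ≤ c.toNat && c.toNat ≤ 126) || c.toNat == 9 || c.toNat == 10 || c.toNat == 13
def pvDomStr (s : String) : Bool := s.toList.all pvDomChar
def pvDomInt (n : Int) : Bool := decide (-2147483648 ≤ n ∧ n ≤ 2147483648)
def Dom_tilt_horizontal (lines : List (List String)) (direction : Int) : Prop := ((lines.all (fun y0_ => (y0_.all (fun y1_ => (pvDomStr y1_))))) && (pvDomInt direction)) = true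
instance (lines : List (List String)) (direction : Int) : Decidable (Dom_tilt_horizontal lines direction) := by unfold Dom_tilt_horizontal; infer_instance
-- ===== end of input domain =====

-- B computes A's result by a closed form (the row-weighted rock count) in one pass,
-- without A's in-place cell-by-cell rock sliding; equivalence is about the RETURN
-- value only (A mutates `lines` in place, B does not).

-- ===== PORT A =====
-- the `while (pos >= 0 and pos < cols) and lines[r][pos] == '.'` rock-sliding loop;
-- fuel `cols+1` is an upper bound on its iterations (pos moves monotonically inside [0, cols))
def pvMove (cols direction : Int) : Nat → List String → Int → List String
  | 0, row, _ => row
  | fuel + 1, row, pos =>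
    if 0 ≤ pos ∧ pos < cols ∧ PySem.List.pyGetD row pos "" = "." then
      -- lines[r][pos], lines[r][pos-direction] = lines[r][pos-direction], lines[r][pos]
      pvMove cols direction fuel
        (PySem.List.pySetD
          (PySem.List.pySetD row pos (PySem.List.pyGetD row (pos - direction) ""))
          (pos - direction) (PySem.List.pyGetD row pos ""))
        (pos + direction)
    else row

-- body of `for r in range(rows)`
def pvInner (rows cols direction c : Int) (st : List (List String) × Int) (r : Int) :
    List (List String) × Int :=
  if PySem.List.pyGetD (PySem.List.pyGetD st.1 r []) c "" = "O" then
    (PySem.List.pySetD st.1 r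
       (pvMove cols direction (cols.toNat + 1) (PySem.List.pyGetD st.1 r []) (c + direction)),
     st.2 + (rows - r))
  else st

def tilt_horizontal (lines : List (List String)) (direction : Int) : Int :=
  let rows : Int := (lines.length : Int)
  let cols : Int := ((PySem.List.pyGetD lines 0 []).length : Int)
  let sei : Int × Int × Int := if direction = -1 then (0, cols, 1) else (cols - 1, -1, -1)
  ((PySem.List.pyRange sei.1 sei.2.1 sei.2.2).foldl
      (fun st c => (PySem.List.pyRange 0 rows 1).foldl (pvInner rows cols direction c) st)
      (lines, 0)).2

-- ===== PORT B =====
def tilt_horizontal_alt (lines : List (List String)) (direction : Int) : Int :=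
  let rows : Int := (lines.length : Int)
  let cols : Int := ((PySem.List.pyGetD lines 0 []).length : Int)
  ((PySem.List.enumerate lines 0).map
      (fun p => (rows - p.1) *
        ((PySem.List.count (PySem.List.slice p.2 none (some cols)) "O" : Nat) : Int))).sum

-- ===== PRECONDITION & SPEC =====
-- Pre_ excludes (a) the inputs where Python A raises IndexError (the empty grid and grids
-- where some row is shorter than the first row), and (b) direction ≤ -2, outside the tilt
-- directions ±1 the function is written for, where A's descending scan re-counts rocks
-- that jump into not-yet-scanned columns and returns an accidental over-count.
def Pre_tilt_horizontal (lines : List (List String)) (direction : Int) : Prop :=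
  lines ≠ [] ∧ (∀ row ∈ lines, (PySem.List.pyGetD lines 0 []).length ≤ row.length) ∧
  -1 ≤ direction
instance (lines : List (List String)) (direction : Int) : Decidable (Pre_tilt_horizontal lines direction) := by unfold Pre_tilt_horizontal; infer_instance

def pvWitness_tilt_horizontal : List (List String) × Int := ([["O", "."], [".", "O"]], -1)

def Spec_tilt_horizontal (lines : List (List String)) (direction : Int) (out : Int) : Prop := out = tilt_horizontal_alt lines direction
instance (lines : List (List String)) (direction : Int) (out : Int) : Decidable (Spec_tilt_horizontal lines direction out) := by unfold Spec_tilt_horizontal; infer_instance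

-- ===== CLAIM =====
def Claim_equal_tilt_horizontal : Prop := ∀ (lines : List (List String)) (direction : Int), Dom_tilt_horizontal lines direction → Pre_tilt_horizontal lines direction → Spec_tilt_horizontal lines direction (tilt_horizontal lines direction)

-- ===== LEMMAS AND PROOFS =====

-- per-row step: what processing one column c does to one row
def pvRowStep (cols d c : Int) (row : List String) : List String :=
  if PySem.List.pyGetD row c "" = "O" then pvMove cols d (cols.toNat + 1) row (c + d) else row

-- per-row run over a column list: final row and number of hits (counted rocks)
def pvRowRun (cols d : Int) (cs : List Int) (row : List String) : List String × Int :=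
  cs.foldl
    (fun p c => (pvRowStep cols d c p.1,
                 p.2 + (if PySem.List.pyGetD p.1 c "" = "O" then (1 : Int) else 0)))
    (row, 0)


-- reading past a write at a different (nonnegative) index is unchanged
theorem pv_getD_setD_ne (xs : List String) (i j : Int) (v : String)
    (hi : 0 ≤ i) (hj : 0 ≤ j) (hne : i ≠ j) :
    PySem.List.pyGetD (PySem.List.pySetD xs i v) j "" = PySem.List.pyGetD xs j "" := by
  rw [PySem.List.pySetD_of_nonneg _ _ hi, PySem.List.pyGetD_of_nonneg _ _ hj,
    PySem.List.pyGetD_of_nonneg _ _ hj, List.getD_eq_getElem?_getD, List.getD_eq_getElem?_getD,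
    List.getElem?_set_ne (by omega)]

-- the rock-slide with step d ≤ -1 leaves every cell to the right of pos - d unchanged
theorem pvMove_preserve_gt (cols d : Int) (hd : d ≤ -1) :
    ∀ (fuel : Nat) (row : List String) (pos j : Int), 0 ≤ j → pos - d < j →
    PySem.List.pyGetD (pvMove cols d fuel row pos) j "" = PySem.List.pyGetD row j "" := by
  intro fuel
  induction fuel with
  | zero => intro row pos j _ _; rfl
  | succ n ih =>
    intro row pos j hj hlt
    rw [pvMove]
    split_ifs with h
    · rw [ih _ _ _ hj (by omega),
        pv_getD_setD_ne _ _ _ _ (by omega) hj (by omega),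
        pv_getD_setD_ne _ _ _ _ h.1 hj (by omega)]
    · rfl

-- the rock-slide with step d ≥ 1 leaves every cell to the left of pos - d unchanged
theorem pvMove_preserve_lt (cols d : Int) (hd : 1 ≤ d) :
    ∀ (fuel : Nat) (row : List String) (pos j : Int), 0 ≤ j → j < pos - d →
    PySem.List.pyGetD (pvMove cols d fuel row pos) j "" = PySem.List.pyGetD row j "" := by
  intro fuel
  induction fuel with
  | zero => intro row pos j _ _; rfl
  | succ n ih =>
    intro row pos j hj hlt
    rw [pvMove]
    split_ifs with h
    · rw [ih _ _ _ hj (by omega),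
        pv_getD_setD_ne _ _ _ _ (by omega) hj (by omega),
        pv_getD_setD_ne _ _ _ _ h.1 hj (by omega)]
    · rfl

theorem pv_set_append_len (pre tl : List (List String)) (x v : List String) :
    (pre ++ x :: tl).set pre.length v = pre ++ v :: tl := by
  induction pre with
  | nil => rfl
  | cons y ys ih => simp [List.set, ih]

theorem pv_getD_append_len (pre tl : List (List String)) (x : List String) :
    PySem.List.pyGetD (pre ++ x :: tl) (pre.length : Int) [] = x := by
  simp [PySem.List.pyGetD, PySem.List.pyGet?_append_length]


-- one pass of the inner `for r in range(rows)` loop: every row takes one column-step,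
-- and s gains the weight of each row whose scanned cell is 'O'
theorem pv_inner_eq (rows cols d c : Int) :
    ∀ (g pre : List (List String)) (s : Int), rows = pre.length + g.length →
    (PySem.List.pyRange (pre.length : Int) rows 1).foldl (pvInner rows cols d c) (pre ++ g, s)
    = (pre ++ g.map (pvRowStep cols d c),
       s + ((PySem.List.enumerate g (pre.length : Int)).map
              (fun p => if PySem.List.pyGetD p.2 c "" = "O" then rows - p.1 else 0)).sum) := by
  intro g
  induction g with
  | nil =>
    intro pre s h
    rw [PySem.List.pyRange_one_eq_nil (by simp at h; omega)]
    simp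
  | cons row tl ih =>
    intro pre s h
    have hlt : (pre.length : Int) < rows := by simp at h; omega
    rw [PySem.List.pyRange_one_cons hlt, List.foldl_cons]
    have hstep : pvInner rows cols d c (pre ++ row :: tl, s) (pre.length : Int)
        = (pre ++ pvRowStep cols d c row :: tl,
           s + (if PySem.List.pyGetD row c "" = "O" then rows - (pre.length : Int) else 0)) := by
      unfold pvInner pvRowStep
      rw [pv_getD_append_len]
      split_ifs with hO
      · rw [PySem.List.pySetD_natCast, pv_set_append_len]
      · simp
    rw [hstep]
    have hrw : pre ++ pvRowStep cols d c row :: tl = (pre ++ [pvRowStep cols d c row]) ++ tl := by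
      simp
    rw [hrw]
    have hlen : rows = ((pre ++ [pvRowStep cols d c row]).length : Int) + tl.length := by
      simp at h ⊢; omega
    have hcast : (pre.length : Int) + 1 = (((pre ++ [pvRowStep cols d c row]).length : Nat) : Int) := by
      simp
    rw [hcast, ih _ _ hlen]
    simp only [PySem.List.enumerate_cons, List.map_cons, List.sum_cons, ← hcast,
      Prod.mk.injEq]
    exact ⟨by simp, by ring⟩



-- a per-row run started at accumulator a is the run from 0, shifted
theorem pv_rowRun_shift' (cols d : Int) :
    ∀ (cs : List Int) (row : List String) (a b : Int),
    (cs.foldl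
      (fun p c => (pvRowStep cols d c p.1,
                   p.2 + (if PySem.List.pyGetD p.1 c "" = "O" then (1 : Int) else 0)))
      (row, a)).1
    = (cs.foldl
      (fun p c => (pvRowStep cols d c p.1,
                   p.2 + (if PySem.List.pyGetD p.1 c "" = "O" then (1 : Int) else 0)))
      (row, b)).1
    ∧ (cs.foldl
      (fun p c => (pvRowStep cols d c p.1,
                   p.2 + (if PySem.List.pyGetD p.1 c "" = "O" then (1 : Int) else 0)))
      (row, a)).2 - a
    = (cs.foldl
      (fun p c => (pvRowStep cols d c p.1,
                   p.2 + (if PySem.List.pyGetD p.1 c "" = "O" then (1 : Int) else 0)))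
      (row, b)).2 - b := by
  intro cs
  induction cs with
  | nil => intro row a b; simp
  | cons c cs ih =>
    intro row a b
    simp only [List.foldl_cons]
    obtain ⟨h1, h2⟩ := ih (pvRowStep cols d c row)
      (a + (if PySem.List.pyGetD row c "" = "O" then (1 : Int) else 0))
      (b + (if PySem.List.pyGetD row c "" = "O" then (1 : Int) else 0))
    exact ⟨h1, by generalize (if PySem.List.pyGetD row c "" = "O" then (1 : Int) else 0) = i at h2 ⊢; omega⟩

theorem pv_rowRun_shift (cols d : Int) (cs : List Int) (row : List String) (a : Int) :
    cs.foldl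
      (fun p c => (pvRowStep cols d c p.1,
                   p.2 + (if PySem.List.pyGetD p.1 c "" = "O" then (1 : Int) else 0)))
      (row, a)
    = ((pvRowRun cols d cs row).1, a + (pvRowRun cols d cs row).2) := by
  obtain ⟨h1, h2⟩ := pv_rowRun_shift' cols d cs row a 0
  rw [Prod.ext_iff]
  exact ⟨h1, by unfold pvRowRun; omega⟩

theorem pv_rowRun_cons (cols d c : Int) (cs : List Int) (row : List String) :
    pvRowRun cols d (c :: cs) row
    = ((pvRowRun cols d cs (pvRowStep cols d c row)).1,
       (if PySem.List.pyGetD row c "" = "O" then (1 : Int) else 0)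
       + (pvRowRun cols d cs (pvRowStep cols d c row)).2) := by
  unfold pvRowRun
  rw [List.foldl_cons, pv_rowRun_shift]
  norm_num
  constructor <;> rfl

theorem pv_enumerate_map (f : List String → List String) :
    ∀ (g : List (List String)) (k : Int),
    PySem.List.enumerate (g.map f) k = (PySem.List.enumerate g k).map (fun p => (p.1, f p.2)) := by
  intro g
  induction g with
  | nil => intro k; rfl
  | cons row tl ih => intro k; simp [PySem.List.enumerate_cons, ih]

-- the whole double loop: grid rows evolve independently; s is the weighted hit count
theorem pv_outer_eq (rows cols d : Int) :
    ∀ (cs : List Int) (g : List (List String)) (s : Int), rows = g.length →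
    cs.foldl (fun st c => (PySem.List.pyRange 0 rows 1).foldl (pvInner rows cols d c) st) (g, s)
    = (g.map (fun row => (pvRowRun cols d cs row).1),
       s + ((PySem.List.enumerate g 0).map
              (fun p => (rows - p.1) * (pvRowRun cols d cs p.2).2)).sum) := by
  intro cs
  induction cs with
  | nil =>
    intro g s h
    simp only [List.foldl_nil, pvRowRun]
    rw [List.sum_eq_zero (by simp)]
    simp
  | cons c cs ih =>
    intro g s h
    simp only [List.foldl_cons]
    have hin := pv_inner_eq rows cols d c g [] s (by simpa using h)
    simp only [List.nil_append, List.length_nil, Nat.cast_zero] at hin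
    rw [hin, ih _ _ (by simpa using h)]
    simp only [List.map_map, pv_enumerate_map, Prod.mk.injEq]
    constructor
    · apply List.map_congr_left
      intro row _
      simp only [Function.comp_apply, pv_rowRun_cons]
    · have hsplit : ∀ p : Int × List String,
          (rows - p.1) * (pvRowRun cols d (c :: cs) p.2).2
          = (if PySem.List.pyGetD p.2 c "" = "O" then rows - p.1 else 0)
            + (rows - p.1) * (pvRowRun cols d cs (pvRowStep cols d c p.2)).2 := by
        intro p
        simp only [pv_rowRun_cons]
        split_ifs <;> ring
      rw [show (List.map (fun p => (rows - p.1) * (pvRowRun cols d (c :: cs) p.2).2)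
            (PySem.List.enumerate g 0))
          = List.map (fun p : Int × List String =>
              (if PySem.List.pyGetD p.2 c "" = "O" then rows - p.1 else 0)
              + (rows - p.1) * (pvRowRun cols d cs (pvRowStep cols d c p.2)).2)
            (PySem.List.enumerate g 0) from List.map_congr_left (fun p _ => hsplit p)]
      rw [PySem.List.sum_map_add_int]
      simp only [List.map_map, Function.comp_def]
      ring


-- direction -1, ascending scan: cells at columns ≥ the scan point stay as in the initial
-- row, so each scanned cell reads the initial row and the hits sum its 'O' indicators
theorem pv_row_asc (cols : Int) (N : Nat) (hcols : cols = (N : Int)) (row₀ : List String) :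
    ∀ (n k : Nat) (row : List String), N - k = n → k ≤ N →
    (∀ j : Nat, k ≤ j → PySem.List.pyGetD row (j : Int) "" = PySem.List.pyGetD row₀ (j : Int) "") →
    (pvRowRun cols (-1) (PySem.List.pyRange (k : Int) (N : Int) 1) row).2
    = ((PySem.List.pyRange (k : Int) (N : Int) 1).map
        (fun c => if PySem.List.pyGetD row₀ c "" = "O" then (1 : Int) else 0)).sum := by
  intro n
  induction n with
  | zero =>
    intro k row h _ _
    rw [PySem.List.pyRange_one_eq_nil (by omega)]
    simp [pvRowRun]
  | succ m ih =>
    intro k row h hk hag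
    have hkN : k < N := by omega
    rw [PySem.List.pyRange_one_cons (by exact_mod_cast hkN), pv_rowRun_cons]
    have hag' : ∀ j : Nat, k + 1 ≤ j →
        PySem.List.pyGetD (pvRowStep cols (-1) (k : Int) row) (j : Int) ""
        = PySem.List.pyGetD row₀ (j : Int) "" := by
      intro j hj
      unfold pvRowStep
      split_ifs with hO
      · rw [pvMove_preserve_gt cols (-1) (by omega) _ row ((k : Int) + -1) (j : Int)
          (by positivity) (by push_cast; omega)]
        exact hag j (by omega)
      · exact hag j (by omega)
    have hrec := ih (k + 1) (pvRowStep cols (-1) (k : Int) row) (by omega) (by omega) hag'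
    push_cast at hrec
    rw [hrec, List.map_cons, List.sum_cons, hag k le_rfl]

-- direction ≥ 0, descending scan: cells at columns ≤ the scan point stay initial
theorem pv_row_desc (cols : Int) (N : Nat) (hcols : cols = (N : Int)) (d : Int) (hd : 0 ≤ d)
    (row₀ : List String) :
    ∀ (n : Nat) (a : Int) (row : List String), a < (N : Int) → (a + 1).toNat = n →
    (∀ j : Int, 0 ≤ j → j ≤ a → PySem.List.pyGetD row j "" = PySem.List.pyGetD row₀ j "") →
    (pvRowRun cols d (PySem.List.pyRange a (-1) (-1)) row).2
    = ((PySem.List.pyRange a (-1) (-1)).map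
        (fun c => if PySem.List.pyGetD row₀ c "" = "O" then (1 : Int) else 0)).sum := by
  intro n
  induction n with
  | zero =>
    intro a row _ h _
    rw [PySem.List.pyRange_neg_one_eq_nil (by omega)]
    simp [pvRowRun]
  | succ m ih =>
    intro a row haN h hag
    have ha : 0 ≤ a := by omega
    rw [PySem.List.pyRange_neg_one_cons (by omega), pv_rowRun_cons]
    have hag' : ∀ j : Int, 0 ≤ j → j ≤ a - 1 →
        PySem.List.pyGetD (pvRowStep cols d a row) j ""
        = PySem.List.pyGetD row₀ j "" := by
      intro j hj hja
      unfold pvRowStep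
      split_ifs with hO
      · rcases eq_or_lt_of_le hd with hd0 | hd1
        · -- d = 0: the while-guard reads the 'O' cell itself, so no move happens
          rw [← hd0]
          have hNsucc : cols.toNat + 1 = Nat.succ cols.toNat := rfl
          rw [hNsucc, pvMove]
          split_ifs with hg
          · exact absurd hg.2.2 (by rw [show a + 0 = a by ring, hO]; decide)
          · exact hag j hj (by omega)
        · rw [pvMove_preserve_lt cols d (by omega) _ row (a + d) j hj (by omega)]
          exact hag j hj (by omega)
      · exact hag j hj (by omega)
    have hrec := ih (a - 1) (pvRowStep cols d a row) (by omega) (by omega) hag'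
    rw [hrec, List.map_cons, List.sum_cons, hag a ha le_rfl]

-- the 0/1 indicator sum over the first N columns is the 'O'-count of the N-prefix
theorem pv_count_bridge (row : List String) :
    ∀ N : Nat,
    ((PySem.List.pyRange 0 (N : Int) 1).map
        (fun c => if PySem.List.pyGetD row c "" = "O" then (1 : Int) else 0)).sum
    = ((row.take N).count "O" : Int) := by
  intro N
  induction N with
  | zero => simp [PySem.List.pyRange_one_eq_nil]
  | succ n ih =>
    rw [show ((n + 1 : Nat) : Int) = (n : Int) + 1 by push_cast; ring,
      PySem.List.pyRange_one_succ_right (by positivity), List.map_append, List.sum_append, ih,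
      List.take_succ, List.count_append]
    by_cases hn : n < row.length
    · have hcell : PySem.List.pyGetD row ((n : Nat) : Int) "" = row[n] := by
        rw [PySem.List.pyGetD_natCast, List.getD_eq_getElem?_getD, List.getElem?_eq_getElem hn]
        rfl
      simp only [hcell, List.getElem?_eq_getElem hn, Option.toList_some, List.count_singleton]
      by_cases hOx : row[n] = "O"
      · simp [hOx, beq_iff_eq, List.getElem?_eq_getElem hn]
      · simp [hOx, beq_iff_eq, List.getElem?_eq_getElem hn]
    · have hnone : row[n]? = none := List.getElem?_eq_none (by omega)
      have hdef : PySem.List.pyGetD row ((n : Nat) : Int) "" = "" := by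
        rw [PySem.List.pyGetD_natCast, List.getD_eq_getElem?_getD, hnone]
        rfl
      simp [hdef, hnone]

-- the descending scan visits the same columns as the ascending one
theorem pv_sum_desc (N : Nat) (f : Int → Int) :
    ((PySem.List.pyRange ((N : Int) - 1) (-1) (-1)).map f).sum
    = ((PySem.List.pyRange 0 (N : Int) 1).map f).sum := by
  rw [PySem.List.pyRange_neg_one_eq_reverse, List.map_reverse, List.sum_reverse]
  norm_num

-- B's summand for one row equals the indicator sum over the first N columns
theorem pv_alt_row (row : List String) (N : Nat) :
    ((PySem.List.count (PySem.List.slice row none (some (N : Int))) "O" : Nat) : Int)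
    = ((PySem.List.pyRange 0 (N : Int) 1).map
        (fun c => if PySem.List.pyGetD row c "" = "O" then (1 : Int) else 0)).sum := by
  rw [pv_count_bridge, PySem.List.slice_to _ (by positivity), Int.toNat_natCast,
    PySem.List.count_eq]

theorem pv_main (lines : List (List String)) (d : Int) (hd : -1 ≤ d) :
    tilt_horizontal lines d = tilt_horizontal_alt lines d := by
  unfold tilt_horizontal tilt_horizontal_alt
  dsimp only
  set rows := (lines.length : Int) with hrows
  set M := PySem.List.pyGetD lines 0 [] with hM
  by_cases hdir : d = -1
  · subst hdir
    rw [if_pos rfl]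
    rw [pv_outer_eq rows ((M.length : Nat) : Int) (-1) _ lines 0 rfl]
    simp only [zero_add]
    refine congrArg List.sum (List.map_congr_left ?_)
    intro p _
    congr 1
    have hasc := pv_row_asc ((M.length : Nat) : Int) M.length rfl p.2 M.length 0 p.2
      (by omega) (by omega) (fun j _ => rfl)
    norm_num at hasc
    rw [hasc, pv_alt_row]
  · rw [if_neg hdir]
    rw [pv_outer_eq rows ((M.length : Nat) : Int) d _ lines 0 rfl]
    simp only [zero_add]
    refine congrArg List.sum (List.map_congr_left ?_)
    intro p _
    congr 1
    rw [pv_alt_row, ← pv_sum_desc M.length]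
    exact pv_row_desc ((M.length : Nat) : Int) M.length rfl d (by omega) p.2
      (((M.length : Int) - 1) + 1).toNat ((M.length : Int) - 1) p.2 (by omega) rfl
      (fun j _ _ => rfl)

-- ===== VERDICT =====
theorem tilt_horizontal_spec : Claim_equal_tilt_horizontal := by
  intro lines direction _ hpre
  exact pv_main lines direction hpre.2.2
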